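-- pv_equiv track=rewrite | github.com/raeez/chiral-bar-cobar-vol2 | compute/lib/km_c4_root_mult.py | _decompositions
-- ===== SOURCE A (Python) =====
-- from typing import Any, Dict, List, Optional, Tuple
--
-- def _enumerate_roots_at_height(h: int, rank: int) -> List[Tuple[int, ...]]:
--     """Enumerate all tuples of non-negative integers summing to h with rank entries."""
--     if rank == 1:
--         return [(h,)]
--     result = []
--     for first in range(h + 1):
--         for rest in _enumerate_roots_at_height(h - first, rank - 1):
--             result.append((first,) + rest)
--     return result
--
-- def _decompositions(alpha: Tuple[int, ...], rank: int) -> List[Tuple[int, ...]]: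
--     """Generate all positive roots gamma < alpha (componentwise, at least one strictly less)."""
--     result = []
--     h = sum(alpha)
--     for gamma_h in range(1, h):
--         for gamma in _enumerate_roots_at_height(gamma_h, rank):
--             if all(gamma[i] <= alpha[i] for i in range(rank)):
--                 comp = tuple(alpha[i] - gamma[i] for i in range(rank))
--                 if any(c > 0 for c in comp) and sum(comp) > 0:
--                     result.append(gamma)
--     return result
-- ===== SOURCE B (Python) =====
-- def _bounded(caps, remaining):
--     """All tuples gamma with 0 <= gamma[i] <= caps[i] and sum(gamma) == remaining, lex order."""
--     if not caps:
--         return [()] if remaining == 0 else []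
--     out = []
--     for v in range(min(caps[0], remaining) + 1):
--         for rest in _bounded(caps[1:], remaining - v):
--             out.append((v,) + rest)
--     return out
--
-- def _decompositions(alpha, rank):
--     h = sum(alpha)
--     caps = list(alpha[:rank])
--     s = sum(caps)
--     result = []
--     for gamma_h in range(1, min(h, s)):
--         result.extend(_bounded(caps, gamma_h))
--     return result
-- ===== Notes on version B (the rewrite author's own statement) =====
-- stated objective: alternative
-- what changed: B enumerates capped compositions directly by bounded recursion (each coordinate ranges over 0..min(alpha[i], remaining)) and prunes heights >= sum(alpha[:rank]), instead of A's generating every composition of every height 1..sum(alpha)-1 and filtering each against alpha; the output (and hence the worst-case cost on large inputs) is the same.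
import Mathlib
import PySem

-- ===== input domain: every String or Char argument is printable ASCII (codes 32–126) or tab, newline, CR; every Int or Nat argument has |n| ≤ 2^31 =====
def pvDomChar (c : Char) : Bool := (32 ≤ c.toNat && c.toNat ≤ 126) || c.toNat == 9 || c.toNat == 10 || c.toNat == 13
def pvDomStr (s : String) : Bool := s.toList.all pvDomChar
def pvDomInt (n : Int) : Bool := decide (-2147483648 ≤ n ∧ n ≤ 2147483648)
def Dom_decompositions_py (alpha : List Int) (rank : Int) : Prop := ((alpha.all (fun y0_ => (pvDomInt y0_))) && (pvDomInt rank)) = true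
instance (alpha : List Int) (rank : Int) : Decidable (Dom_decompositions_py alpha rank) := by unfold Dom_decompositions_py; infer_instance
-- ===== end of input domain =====

-- B replaces A's generate-all-compositions-then-filter with a bounded recursive enumeration
-- (per-coordinate cap min(alpha[i], remaining)) plus a height prune, producing the same list
-- in the same height-then-lex order; objective: alternative algorithm, same output and cost.

-- ===== PORT A =====
-- Python's _enumerate_roots_at_height recurses on rank (it diverges for rank ≤ 0 when
-- reached; inside Pre_ it is only called with rank ≥ 1, where rank.toNat recursion is exact).
def enumRootsAtHeight (h : Int) : Nat → List (List Int)
  | 0 => []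
  | 1 => [[h]]
  | n + 2 =>
      (PySem.List.pyRange 0 (h + 1) 1).foldl
        (fun result first =>
          (enumRootsAtHeight (h - first) (n + 1)).foldl
            (fun result rest => result ++ [first :: rest]) result)
        []

-- alpha[i]/gamma[i] are ported with pyGetD (default 0): inside Pre_ every evaluated index is
-- in range or unreached by Python's short-circuiting all(), where the value agrees.
def decompositions_py (alpha : List Int) (rank : Int) : List (List Int) :=
  let h := alpha.sum
  (PySem.List.pyRange 1 h 1).foldl
    (fun result gamma_h =>
      (enumRootsAtHeight gamma_h rank.toNat).foldl
        (fun result gamma =>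
          if (PySem.List.pyRange 0 rank 1).all
              (fun i => decide (PySem.List.pyGetD gamma i 0 ≤ PySem.List.pyGetD alpha i 0)) then
            let comp := (PySem.List.pyRange 0 rank 1).map
              (fun i => PySem.List.pyGetD alpha i 0 - PySem.List.pyGetD gamma i 0)
            if comp.any (fun c => decide (0 < c)) && decide (0 < comp.sum) then
              result ++ [gamma]
            else result
          else result)
        result)
    []

-- ===== PORT B =====
def boundedComps : List Int → Int → List (List Int)
  | [], remaining => if remaining = 0 then [[]] else []
  | c :: cs, remaining =>
      (PySem.List.pyRange 0 (min c remaining + 1) 1).foldl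
        (fun out v =>
          (boundedComps cs (remaining - v)).foldl
            (fun out rest => out ++ [v :: rest]) out)
        []

def decompositions_py_alt (alpha : List Int) (rank : Int) : List (List Int) :=
  let h := alpha.sum
  let caps := PySem.List.slice alpha none (some rank)
  let s := caps.sum
  (PySem.List.pyRange 1 (min h s) 1).foldl
    (fun result gamma_h => result ++ boundedComps caps gamma_h) []

-- ===== PRECONDITION & SPEC =====
-- Pre_ excludes exactly the inputs where Python A raises: rank ≤ 0 with sum(alpha) ≥ 2
-- (RecursionError in _enumerate_roots_at_height) and rank > len(alpha) with sum(alpha) ≥ 2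
-- and all entries nonnegative (IndexError); when rank > len(alpha) but some entry is
-- negative, all() short-circuits before the bad index and A returns [], so that is kept.
def Pre_decompositions_py (alpha : List Int) (rank : Int) : Prop :=
  (1 ≤ rank ∧ rank ≤ alpha.length) ∨ alpha.sum ≤ 1 ∨
    ((alpha.length : Int) < rank ∧ ∃ c ∈ alpha, c < 0)
instance (alpha : List Int) (rank : Int) : Decidable (Pre_decompositions_py alpha rank) := by
  unfold Pre_decompositions_py; infer_instance

def pvWitness_decompositions_py : List Int × Int := ([2, 1], 2)

def Spec_decompositions_py (alpha : List Int) (rank : Int) (out : List (List Int)) : Prop := out = decompositions_py_alt alpha rank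
instance (alpha : List Int) (rank : Int) (out : List (List Int)) : Decidable (Spec_decompositions_py alpha rank out) := by unfold Spec_decompositions_py; infer_instance

-- ===== CLAIM (what is proved, stated in full; the proofs are below) =====
def Claim_equal_decompositions_py : Prop := ∀ (alpha : List Int) (rank : Int), Dom_decompositions_py alpha rank → Pre_decompositions_py alpha rank → Spec_decompositions_py alpha rank (decompositions_py alpha rank)

-- ===== LEMMAS AND PROOFS =====

-- pointwise ≤ test used to characterise A's index-based check
def le2 : List Int → List Int → Bool
  | [], [] => true
  | x :: xs, c :: cs => decide (x ≤ c) && le2 xs cs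
  | _, _ => false

theorem le2_iff (caps : List Int) : ∀ (g : List Int),
    le2 g caps = true ↔ g.length = caps.length ∧
      ∀ k : Nat, k < caps.length → g.getD k 0 ≤ caps.getD k 0 := by
  induction caps with
  | nil => intro g; cases g <;> simp [le2]
  | cons c cs ih =>
    intro g
    cases g with
    | nil => simp [le2]
    | cons x xs =>
      simp only [le2, Bool.and_eq_true, decide_eq_true_eq, ih xs, List.length_cons]
      constructor
      · rintro ⟨hx, hl, hk⟩
        refine ⟨by omega, ?_⟩
        intro k hk'
        cases k with
        | zero => simpa using hx
        | succ k => simpa using hk k (by omega)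
      · rintro ⟨hl, hk⟩
        refine ⟨by simpa using hk 0 (by omega), by omega, ?_⟩
        intro k hk'
        simpa using hk (k + 1) (by omega)

theorem flatMap_congr' {α β : Type} {l : List α} {f g : α → List β}
    (h : ∀ x ∈ l, f x = g x) : l.flatMap f = l.flatMap g := by
  induction l with
  | nil => rfl
  | cons a l ih =>
    simp only [List.flatMap_cons, h a (by simp), ih (fun x hx => h x (by simp [hx]))]

theorem flatMap_nil' {α β : Type} (l : List α) : l.flatMap (fun _ => ([] : List β)) = [] := by
  simp

-- normal forms of the two ports' loops
theorem enum_norm (h : Int) (n : Nat) :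
    enumRootsAtHeight h (n + 2) =
      (PySem.List.pyRange 0 (h + 1) 1).flatMap
        (fun first => (enumRootsAtHeight (h - first) (n + 1)).map (first :: ·)) := by
  show (PySem.List.pyRange 0 (h + 1) 1).foldl _ [] = _
  have hfn : (fun (result : List (List Int)) (first : Int) =>
        (enumRootsAtHeight (h - first) (n + 1)).foldl
          (fun result rest => result ++ [first :: rest]) result) =
      (fun result first => result ++ (enumRootsAtHeight (h - first) (n + 1)).map (first :: ·)) := by
    funext result first
    exact PySem.List.foldl_append_singleton_eq_map _ _ _
  rw [hfn, PySem.List.foldl_append_eq_flatMap]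
  simp

theorem bounded_norm (c : Int) (cs : List Int) (r : Int) :
    boundedComps (c :: cs) r =
      (PySem.List.pyRange 0 (min c r + 1) 1).flatMap
        (fun v => (boundedComps cs (r - v)).map (v :: ·)) := by
  show (PySem.List.pyRange 0 (min c r + 1) 1).foldl _ [] = _
  have hfn : (fun (out : List (List Int)) (v : Int) =>
        (boundedComps cs (r - v)).foldl (fun out rest => out ++ [v :: rest]) out) =
      (fun out v => out ++ (boundedComps cs (r - v)).map (v :: ·)) := by
    funext out v
    exact PySem.List.foldl_append_singleton_eq_map _ _ _
  rw [hfn, PySem.List.foldl_append_eq_flatMap]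
  simp

-- A's condition as one Bool
def pAcond (alpha : List Int) (rank : Int) (gamma : List Int) : Bool :=
  ((PySem.List.pyRange 0 rank 1).all
      (fun i => decide (PySem.List.pyGetD gamma i 0 ≤ PySem.List.pyGetD alpha i 0))) &&
  (let comp := (PySem.List.pyRange 0 rank 1).map
      (fun i => PySem.List.pyGetD alpha i 0 - PySem.List.pyGetD gamma i 0)
   comp.any (fun c => decide (0 < c)) && decide (0 < comp.sum))

theorem A_norm (alpha : List Int) (rank : Int) :
    decompositions_py alpha rank =
      (PySem.List.pyRange 1 alpha.sum 1).flatMap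
        (fun gamma_h => (enumRootsAtHeight gamma_h rank.toNat).filter (pAcond alpha rank)) := by
  show (PySem.List.pyRange 1 alpha.sum 1).foldl _ [] = _
  have hfn : ∀ (gamma_h : Int), (fun (result : List (List Int)) (gamma : List Int) =>
        if (PySem.List.pyRange 0 rank 1).all
            (fun i => decide (PySem.List.pyGetD gamma i 0 ≤ PySem.List.pyGetD alpha i 0)) then
          let comp := (PySem.List.pyRange 0 rank 1).map
            (fun i => PySem.List.pyGetD alpha i 0 - PySem.List.pyGetD gamma i 0)
          if comp.any (fun c => decide (0 < c)) && decide (0 < comp.sum) then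
            result ++ [gamma]
          else result
        else result) =
      (fun result gamma => if pAcond alpha rank gamma then result ++ [gamma] else result) := by
    intro gamma_h
    funext result gamma
    simp only [pAcond]
    by_cases h1 : (PySem.List.pyRange 0 rank 1).all
        (fun i => decide (PySem.List.pyGetD gamma i 0 ≤ PySem.List.pyGetD alpha i 0)) = true
    · simp only [h1, if_true, Bool.true_and]
    · rw [Bool.not_eq_true] at h1
      simp only [h1, Bool.false_and, Bool.false_eq_true, if_false]
  have hfn2 : (fun (result : List (List Int)) (gamma_h : Int) =>
        (enumRootsAtHeight gamma_h rank.toNat).foldl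
          (fun result gamma =>
            if (PySem.List.pyRange 0 rank 1).all
                (fun i => decide (PySem.List.pyGetD gamma i 0 ≤ PySem.List.pyGetD alpha i 0)) then
              let comp := (PySem.List.pyRange 0 rank 1).map
                (fun i => PySem.List.pyGetD alpha i 0 - PySem.List.pyGetD gamma i 0)
              if comp.any (fun c => decide (0 < c)) && decide (0 < comp.sum) then
                result ++ [gamma]
              else result
            else result)
          result) =
      (fun result gamma_h =>
        result ++ (enumRootsAtHeight gamma_h rank.toNat).filter (pAcond alpha rank)) := by
    funext result gamma_h
    rw [hfn gamma_h]
    exact PySem.List.foldl_append_if_eq_filter _ _ _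
  rw [hfn2, PySem.List.foldl_append_eq_flatMap]
  simp

theorem B_norm (alpha : List Int) (rank : Int) :
    decompositions_py_alt alpha rank =
      (PySem.List.pyRange 1 (min alpha.sum (PySem.List.slice alpha none (some rank)).sum) 1).flatMap
        (boundedComps (PySem.List.slice alpha none (some rank))) := by
  show (PySem.List.pyRange 1 _ 1).foldl _ [] = _
  rw [PySem.List.foldl_append_eq_flatMap]
  simp

-- facts about every tuple A's enumerator produces
theorem enum_mem (n : Nat) : ∀ (h : Int) (g : List Int), g ∈ enumRootsAtHeight h (n + 1) →
    g.length = n + 1 ∧ g.sum = h ∧ (0 ≤ h → ∀ x ∈ g, 0 ≤ x) := by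
  induction n with
  | zero =>
    intro h g hg
    simp [enumRootsAtHeight] at hg
    subst hg
    refine ⟨rfl, by simp, ?_⟩
    intro hh x hx
    simp at hx
    omega
  | succ n ih =>
    intro h g hg
    rw [enum_norm] at hg
    simp only [List.mem_flatMap, List.mem_map] at hg
    obtain ⟨first, hfirst, rest, hrest, rfl⟩ := hg
    rw [PySem.List.mem_pyRange_one] at hfirst
    obtain ⟨hl, hs, hnn⟩ := ih (h - first) rest hrest
    refine ⟨by simp [hl], by rw [List.sum_cons, hs]; ring, ?_⟩
    intro hh x hx
    simp at hx
    rcases hx with rfl | hx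
    · omega
    · exact hnn (by omega) x hx

-- a flatMap that picks at most one element
theorem flatMap_pick {α : Type} (t : Int) (G : Int → List α) :
    ∀ (l : List Int), l.Nodup →
      l.flatMap (fun v => if v = t then [G v] else []) = if t ∈ l then [G t] else [] := by
  intro l
  induction l with
  | nil => simp
  | cons a l ih =>
    intro hnd
    simp only [List.nodup_cons] at hnd
    simp only [List.flatMap_cons, ih hnd.2]
    by_cases ha : a = t
    · subst ha
      simp [hnd.1]
    · simp [ha, List.mem_cons, Ne.symm ha]

-- restrict a guarded flatMap over a range
theorem flatMap_if_le {α : Type} (a b c : Int) (F : Int → List α) :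
    (PySem.List.pyRange a b 1).flatMap (fun v => if v ≤ c then F v else []) =
      (PySem.List.pyRange a (min b (c + 1)) 1).flatMap F := by
  by_cases hb : b ≤ c + 1
  · rw [min_eq_left hb]
    apply flatMap_congr'
    intro v hv
    rw [PySem.List.mem_pyRange_one] at hv
    rw [if_pos (by omega)]
  · rw [min_eq_right (by omega)]
    by_cases ha : a ≤ c + 1
    · rw [PySem.List.pyRange_one_append a (c + 1) b ha (by omega), List.flatMap_append]
      have h2 : (PySem.List.pyRange (c + 1) b 1).flatMap (fun v => if v ≤ c then F v else []) = [] := by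
        have hz : ∀ v ∈ PySem.List.pyRange (c + 1) b 1, (if v ≤ c then F v else []) = [] := by
          intro v hv
          rw [PySem.List.mem_pyRange_one] at hv
          rw [if_neg (by omega)]
        rw [flatMap_congr' hz, flatMap_nil']
      rw [h2, List.append_nil]
      apply flatMap_congr'
      intro v hv
      rw [PySem.List.mem_pyRange_one] at hv
      rw [if_pos (by omega)]
    · have hz : ∀ v ∈ PySem.List.pyRange a b 1, (if v ≤ c then F v else []) = [] := by
        intro v hv
        rw [PySem.List.mem_pyRange_one] at hv
        rw [if_neg (by omega)]
      rw [flatMap_congr' hz, flatMap_nil', PySem.List.pyRange_one_eq_nil (by omega)]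
      rfl

-- a negative cap empties the bounded enumeration
theorem negcap : ∀ (caps : List Int) (r : Int), (∃ c ∈ caps, c < 0) → 0 ≤ r →
    boundedComps caps r = [] := by
  intro caps
  induction caps with
  | nil => simp
  | cons c cs ih =>
    intro r hneg hr
    rw [bounded_norm]
    by_cases hc : c < 0
    · rw [PySem.List.pyRange_one_eq_nil (by omega : min c r + 1 ≤ 0)]
      rfl
    · obtain ⟨d, hd, hdneg⟩ := hneg
      simp only [List.mem_cons] at hd
      rcases hd with rfl | hd
      · omega
      have hz : ∀ v ∈ PySem.List.pyRange 0 (min c r + 1) 1,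
          (boundedComps cs (r - v)).map (v :: ·) = [] := by
        intro v hv
        rw [PySem.List.mem_pyRange_one] at hv
        rw [ih (r - v) ⟨d, hd, hdneg⟩ (by omega)]
        rfl
      rw [flatMap_congr' hz, flatMap_nil']

-- THE key lemma: filtering the full enumeration by the caps equals the bounded enumeration
theorem filter_enum_eq_bounded : ∀ (cs : List Int) (c : Int) (h : Int), 0 ≤ h →
    (enumRootsAtHeight h (cs.length + 1)).filter (fun g => le2 g (c :: cs)) =
      boundedComps (c :: cs) h := by
  intro cs
  induction cs with
  | nil =>
    intro c h hh
    rw [bounded_norm]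
    have hstep : ∀ v : Int, (boundedComps [] (h - v)).map (v :: ·) =
        if v = h then [[v]] else [] := by
      intro v
      show (if h - v = 0 then [[]] else ([] : List (List Int))).map (v :: ·) = _
      split_ifs with h1 h2 h2 <;> simp_all
      omega
    rw [flatMap_congr' (g := fun v => if v = h then [[v]] else []) (fun v _ => hstep v)]
    rw [flatMap_pick h (fun v => [v]) _ (PySem.List.nodup_pyRange_one _ _)]
    have hmem : (h ∈ PySem.List.pyRange 0 (min c h + 1) 1) ↔ (h ≤ c) := by
      rw [PySem.List.mem_pyRange_one]
      omega
    by_cases hc : h ≤ c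
    · rw [if_pos (hmem.mpr hc)]
      simp [enumRootsAtHeight, le2, hc]
    · rw [if_neg (fun hx => hc (hmem.mp hx))]
      simp [enumRootsAtHeight, le2, hc]
  | cons c' cs' ih =>
    intro c h hh
    show (enumRootsAtHeight h (cs'.length + 2)).filter _ = _
    rw [enum_norm, bounded_norm, List.flatMap_def, List.filter_flatten, List.map_map]
    have hstep : ∀ first ∈ PySem.List.pyRange 0 (h + 1) 1,
        ((enumRootsAtHeight (h - first) (cs'.length + 1)).map (first :: ·)).filter
            (fun g => le2 g (c :: c' :: cs')) =
          (if first ≤ c then (boundedComps (c' :: cs') (h - first)).map (first :: ·) else []) := by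
      intro first hf
      rw [PySem.List.mem_pyRange_one] at hf
      rw [List.filter_map]
      by_cases hfc : first ≤ c
      · rw [if_pos hfc]
        have : (fun g => le2 g (c :: c' :: cs')) ∘ (first :: ·) =
            (fun g => le2 g (c' :: cs')) := by
          funext g
          simp [le2, hfc]
        rw [this, ih c' (h - first) (by omega)]
      · rw [if_neg hfc]
        have : (fun g => le2 g (c :: c' :: cs')) ∘ (first :: ·) = (fun _ => false) := by
          funext g
          simp [le2, hfc]
        rw [this]
        simp
    calc ((PySem.List.pyRange 0 (h + 1) 1).map
            (fun first => ((enumRootsAtHeight (h - first) (cs'.length + 1)).map (first :: ·)).filter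
              (fun g => le2 g (c :: c' :: cs')))).flatten
        = (PySem.List.pyRange 0 (h + 1) 1).flatMap
            (fun first => if first ≤ c then (boundedComps (c' :: cs') (h - first)).map (first :: ·) else []) := by
          rw [List.flatMap_def]
          congr 1
          exact List.map_congr_left hstep
      _ = (PySem.List.pyRange 0 (min (h + 1) (c + 1)) 1).flatMap
            (fun first => (boundedComps (c' :: cs') (h - first)).map (first :: ·)) :=
          flatMap_if_le 0 (h + 1) c _
      _ = (PySem.List.pyRange 0 (min c h + 1) 1).flatMap
            (fun v => (boundedComps (c' :: cs') (h - v)).map (v :: ·)) := by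
          congr 2
          omega

theorem checkA_iff (alpha g : List Int) (rank : Int) :
    (((PySem.List.pyRange 0 rank 1).all
        (fun i => decide (PySem.List.pyGetD g i 0 ≤ PySem.List.pyGetD alpha i 0))) = true) ↔
      ∀ k : Nat, k < rank.toNat → g.getD k 0 ≤ alpha.getD k 0 := by
  rw [List.all_eq_true]
  constructor
  · intro H k hk
    have hm : ((k : Int) ∈ PySem.List.pyRange 0 rank 1) := by
      rw [PySem.List.mem_pyRange_one]
      omega
    have := H _ hm
    simpa using this
  · intro H i hi
    rw [PySem.List.mem_pyRange_one] at hi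
    have hk : i = ((i.toNat : Nat) : Int) := by omega
    rw [hk]
    simp only [PySem.List.pyGetD_natCast, decide_eq_true_eq]
    exact H i.toNat (by omega)

theorem getD_take (l : List Int) (n k : Nat) (hk : k < n) :
    (l.take n).getD k 0 = l.getD k 0 := by
  by_cases hl : k < l.length
  · rw [List.getD_eq_getElem _ _ (by simp; omega), List.getD_eq_getElem _ _ hl]
    simp
  · rw [List.getD_eq_default _ _ (by simp; omega), List.getD_eq_default _ _ (by omega)]

theorem comp_eq (alpha g : List Int) (rank : Int) (h0 : 0 ≤ rank)
    (hlen : g.length = rank.toNat) (hal : rank.toNat ≤ alpha.length) :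
    ((PySem.List.pyRange 0 rank 1).map
        (fun i => PySem.List.pyGetD alpha i 0 - PySem.List.pyGetD g i 0)) =
      List.zipWith (fun a b => a - b) (alpha.take rank.toNat) g := by
  apply List.ext_getElem
  · simp [PySem.List.length_pyRange_one]
    omega
  · intro k hk1 hk2
    have hk : k < rank.toNat := by
      simp [PySem.List.length_pyRange_one] at hk1
      omega
    simp only [List.getElem_map, PySem.List.getElem_pyRange_one, zero_add,
      List.getElem_zipWith, List.getElem_take, PySem.List.pyGetD_natCast]
    rw [List.getD_eq_getElem _ _ (by omega), List.getD_eq_getElem _ _ (by omega : k < g.length)]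

theorem sum_zipWith_sub : ∀ (xs ys : List Int), xs.length = ys.length →
    (List.zipWith (fun a b => a - b) xs ys).sum = xs.sum - ys.sum := by
  intro xs
  induction xs with
  | nil => intro ys h; cases ys <;> simp_all
  | cons x xs ih =>
    intro ys h
    cases ys with
    | nil => simp at h
    | cons y ys =>
      simp only [List.zipWith_cons_cons, List.sum_cons, ih ys (by simpa using h)]
      ring

theorem any_pos_iff : ∀ (l : List Int), (∀ x ∈ l, 0 ≤ x) →
    ((l.any fun c => decide (0 < c)) = true ↔ 0 < l.sum) := by
  intro l
  induction l with
  | nil => simp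
  | cons x xs ih =>
    intro hnn
    have hx : 0 ≤ x := hnn x (by simp)
    have hxs : ∀ y ∈ xs, 0 ≤ y := fun y hy => hnn y (by simp [hy])
    have hsum : 0 ≤ xs.sum := List.sum_nonneg hxs
    simp only [List.any_cons, List.sum_cons, Bool.or_eq_true, decide_eq_true_eq, ih hxs]
    omega

theorem pAcond_eq (alpha : List Int) (rank : Int) (hr : 1 ≤ rank) (hrl : rank.toNat ≤ alpha.length)
    (gamma_h : Int) (hgh : 1 ≤ gamma_h) (g : List Int)
    (hg : g ∈ enumRootsAtHeight gamma_h rank.toNat) :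
    pAcond alpha rank g =
      (le2 g (alpha.take rank.toNat) && decide (gamma_h < (alpha.take rank.toNat).sum)) := by
  have hcl : (alpha.take rank.toNat).length = rank.toNat := by simp; omega
  obtain ⟨n, hn⟩ : ∃ n, rank.toNat = n + 1 := ⟨rank.toNat - 1, by omega⟩
  rw [hn] at hg
  obtain ⟨hlen, hsum, hnn⟩ := enum_mem n gamma_h g hg
  have hlen' : g.length = rank.toNat := by omega
  have hnn' : ∀ x ∈ g, 0 ≤ x := hnn (by omega)
  have hcomp := comp_eq alpha g rank (by omega) hlen' hrl
  by_cases hle : le2 g (alpha.take rank.toNat) = true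
  · obtain ⟨hleq, hkk⟩ := (le2_iff _ g).mp hle
    have hcheck : ((PySem.List.pyRange 0 rank 1).all
        (fun i => decide (PySem.List.pyGetD g i 0 ≤ PySem.List.pyGetD alpha i 0))) = true := by
      rw [checkA_iff]
      intro k hk
      have h1 := hkk k (by omega)
      rwa [getD_take alpha rank.toNat k hk] at h1
    have hz : ∀ x ∈ List.zipWith (fun a b => a - b) (alpha.take rank.toNat) g, 0 ≤ x := by
      intro x hx
      obtain ⟨i, hi, rfl⟩ := List.mem_iff_getElem.mp hx
      rw [List.getElem_zipWith]
      have hi' : i < rank.toNat := by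
        simp at hi
        omega
      have h2 := hkk i (by omega)
      rw [List.getD_eq_getElem _ _ (by omega : i < (alpha.take rank.toNat).length),
          List.getD_eq_getElem _ _ (by omega : i < g.length)] at h2
      omega
    have hsz : (List.zipWith (fun a b => a - b) (alpha.take rank.toNat) g).sum
        = (alpha.take rank.toNat).sum - gamma_h := by
      rw [sum_zipWith_sub _ _ (by omega), hsum]
    simp only [pAcond, hcheck, hcomp, hsz, Bool.true_and, hle]
    by_cases hlt : gamma_h < (alpha.take rank.toNat).sum
    · have hpos : 0 < (List.zipWith (fun a b => a - b) (alpha.take rank.toNat) g).sum := by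
        rw [hsz]; omega
      rw [(any_pos_iff _ hz).mpr hpos]
      simp [hlt]
    · simp [hlt]
  · have hcheck : ((PySem.List.pyRange 0 rank 1).all
        (fun i => decide (PySem.List.pyGetD g i 0 ≤ PySem.List.pyGetD alpha i 0))) = false := by
      cases hchk : ((PySem.List.pyRange 0 rank 1).all
          (fun i => decide (PySem.List.pyGetD g i 0 ≤ PySem.List.pyGetD alpha i 0))) with
      | false => rfl
      | true =>
        exfalso
        apply hle
        rw [le2_iff]
        refine ⟨by omega, ?_⟩
        intro k hk
        have h1 := (checkA_iff alpha g rank).mp hchk k (by omega)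
        rwa [getD_take alpha rank.toNat k (by omega)]
    rw [Bool.not_eq_true] at hle
    simp only [pAcond, hcheck, hle, Bool.false_and]

-- ===== VERDICT (by name: the statement is the Claim_ definition above) =====
theorem decompositions_py_spec : Claim_equal_decompositions_py := by
  intro alpha rank _hdom hpre
  show decompositions_py alpha rank = decompositions_py_alt alpha rank
  rcases hpre with ⟨hr1, hr2⟩ | hsum | ⟨hrl, c, hc, hcneg⟩
  · -- 1 ≤ rank ≤ len(alpha)
    have h0 : (0 : Int) ≤ rank := by omega
    have hrl : rank.toNat ≤ alpha.length := by omega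
    have hcaps : PySem.List.slice alpha none (some rank) = alpha.take rank.toNat :=
      PySem.List.slice_to alpha h0
    rw [A_norm, B_norm, hcaps]
    have hbody : ∀ gamma_h ∈ PySem.List.pyRange 1 alpha.sum 1,
        (enumRootsAtHeight gamma_h rank.toNat).filter (pAcond alpha rank) =
          (if gamma_h ≤ (alpha.take rank.toNat).sum - 1 then
            boundedComps (alpha.take rank.toNat) gamma_h else []) := by
      intro gamma_h hm
      rw [PySem.List.mem_pyRange_one] at hm
      rw [List.filter_congr
        (fun g hg => pAcond_eq alpha rank (by omega) hrl gamma_h (by omega) g hg)]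
      by_cases hlt : gamma_h < (alpha.take rank.toNat).sum
      · rw [if_pos (by omega)]
        have hfe : (fun g => le2 g (alpha.take rank.toNat) &&
            decide (gamma_h < (alpha.take rank.toNat).sum)) =
            (fun g => le2 g (alpha.take rank.toNat)) := by
          funext g
          simp [hlt]
        rw [hfe]
        have hclen : (alpha.take rank.toNat).length = rank.toNat := by
          simp
          omega
        obtain ⟨cc, cs, hcc⟩ : ∃ cc cs, alpha.take rank.toNat = cc :: cs := by
          cases hx : alpha.take rank.toNat with
          | nil =>
            exfalso
            rw [hx] at hclen
            simp at hclen
            omega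
          | cons cc cs => exact ⟨cc, cs, rfl⟩
        rw [hcc]
        rw [show rank.toNat = cs.length + 1 by
          rw [hcc] at hclen
          simpa using hclen.symm]
        exact filter_enum_eq_bounded cs cc gamma_h (by omega)
      · rw [if_neg (by omega)]
        have hfe : (fun g => le2 g (alpha.take rank.toNat) &&
            decide (gamma_h < (alpha.take rank.toNat).sum)) = (fun _ => false) := by
          funext g
          simp [hlt]
        rw [hfe, List.filter_false]
    rw [flatMap_congr' hbody,
      flatMap_if_le 1 alpha.sum ((alpha.take rank.toNat).sum - 1)
        (boundedComps (alpha.take rank.toNat))]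
    congr 2
    omega
  · -- sum(alpha) ≤ 1: both loops are empty
    rw [A_norm, B_norm,
      PySem.List.pyRange_one_eq_nil (by omega : alpha.sum ≤ 1),
      PySem.List.pyRange_one_eq_nil
        (by
          have := min_le_left alpha.sum (PySem.List.slice alpha none (some rank)).sum
          omega)]
    rfl
  · -- len(alpha) < rank with a negative entry: Python's all() short-circuits, both return []
    have h0 : (0 : Int) ≤ rank := by omega
    have hcaps : PySem.List.slice alpha none (some rank) = alpha := by
      rw [PySem.List.slice_to alpha h0]
      exact List.take_of_length_le (by omega)
    rw [A_norm, B_norm, hcaps]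
    obtain ⟨j, hj, hjv⟩ := List.mem_iff_getElem.mp hc
    have hA : ∀ gamma_h ∈ PySem.List.pyRange 1 alpha.sum 1,
        (enumRootsAtHeight gamma_h rank.toNat).filter (pAcond alpha rank) = [] := by
      intro gamma_h hm
      rw [PySem.List.mem_pyRange_one] at hm
      have hfalse : ∀ g ∈ enumRootsAtHeight gamma_h rank.toNat, pAcond alpha rank g = false := by
        intro g hg
        obtain ⟨n, hn⟩ : ∃ n, rank.toNat = n + 1 := ⟨rank.toNat - 1, by omega⟩
        rw [hn] at hg
        obtain ⟨hlen, _hsum, hnn⟩ := enum_mem n gamma_h g hg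
        have hcheck : ((PySem.List.pyRange 0 rank 1).all
            (fun i => decide (PySem.List.pyGetD g i 0 ≤ PySem.List.pyGetD alpha i 0))) = false := by
          cases hchk : ((PySem.List.pyRange 0 rank 1).all
              (fun i => decide (PySem.List.pyGetD g i 0 ≤ PySem.List.pyGetD alpha i 0))) with
          | false => rfl
          | true =>
            exfalso
            have h1 := (checkA_iff alpha g rank).mp hchk j (by omega)
            rw [List.getD_eq_getElem _ _ (by omega : j < alpha.length), hjv] at h1
            have h2 : 0 ≤ g.getD j 0 := by
              rw [List.getD_eq_getElem _ _ (by omega : j < g.length)]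
              exact hnn (by omega) _ (List.getElem_mem _)
            omega
        simp only [pAcond, hcheck, Bool.false_and]
      rw [List.filter_congr hfalse, List.filter_false]
    rw [flatMap_congr' hA, flatMap_nil']
    have hB : ∀ gamma_h ∈ PySem.List.pyRange 1 (min alpha.sum alpha.sum) 1,
        boundedComps alpha gamma_h = [] := by
      intro gamma_h hm
      rw [PySem.List.mem_pyRange_one] at hm
      exact negcap alpha gamma_h ⟨c, hc, hcneg⟩ (by omega)
    rw [flatMap_congr' hB, flatMap_nil']
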